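-- pv_equiv track=rewrite | github.com/ParkJeong/Algorithm | backjoon/level3/python/2630.py | get_solid_paper
-- ===== SOURCE A (Python) =====
-- def get_solid_paper(paper):
--     blue_count = 0
--     white_count = 0
--     for row in paper:
--         blue_count += row.count(1)
--         white_count += row.count(0)
--         if blue_count * white_count != 0:
--             return 0, 0
--     return (1, 0) if white_count > 0 else (0, 1)
-- ===== SOURCE B (Python) =====
-- def get_solid_paper(paper):
--     colors = set()
--     for row in paper:
--         colors.update(row)
--     has_white = 0 in colors
--     has_blue = 1 in colors
--     if has_white and has_blue:
--         return 0, 0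
--     return (1, 0) if has_white else (0, 1)
-- ===== Notes on version B (the rewrite author's own statement) =====
-- stated objective: simpler
-- what changed: B replaces A's running per-row 0/1 counts with a multiply-and-early-return test by a single pass that collects the set of distinct values and decides from two membership queries.
import Mathlib
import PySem

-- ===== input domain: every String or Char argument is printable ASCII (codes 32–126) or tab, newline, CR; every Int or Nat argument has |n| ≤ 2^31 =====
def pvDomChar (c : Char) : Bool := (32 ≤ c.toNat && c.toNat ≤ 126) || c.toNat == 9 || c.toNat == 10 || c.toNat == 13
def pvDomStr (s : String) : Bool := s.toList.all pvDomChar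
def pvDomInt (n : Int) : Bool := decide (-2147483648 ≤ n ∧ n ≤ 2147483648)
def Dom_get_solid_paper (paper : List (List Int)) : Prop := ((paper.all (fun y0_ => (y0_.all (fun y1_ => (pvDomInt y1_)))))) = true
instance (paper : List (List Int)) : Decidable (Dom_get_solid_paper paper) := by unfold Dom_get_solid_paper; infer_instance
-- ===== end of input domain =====

-- B collects the set of distinct values in one pass and decides from two membership
-- queries, replacing A's running counts with early return (objective: simpler).


-- ===== PORT A =====
-- loop over rows carrying (blue_count, white_count), returning early when both are nonzero
def get_solid_paper_loop : List (List Int) → Int → Int → Int × Int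
  | [], _, white_count => if white_count > 0 then (1, 0) else (0, 1)
  | row :: rest, blue_count, white_count =>
    let blue_count' := blue_count + (PySem.List.count row 1 : Int)
    let white_count' := white_count + (PySem.List.count row 0 : Int)
    if blue_count' * white_count' ≠ 0 then (0, 0)
    else get_solid_paper_loop rest blue_count' white_count'

def get_solid_paper (paper : List (List Int)) : Int × Int :=
  get_solid_paper_loop paper 0 0

-- ===== PORT B =====
def get_solid_paper_alt (paper : List (List Int)) : Int × Int :=
  let colors : PySem.Set Int := paper.foldl (fun s row => PySem.Set.update s row) PySem.Set.empty
  let has_white := PySem.Set.contains colors 0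
  let has_blue := PySem.Set.contains colors 1
  if has_white && has_blue then (0, 0)
  else if has_white then (1, 0) else (0, 1)

-- ===== PRECONDITION & SPEC =====
def Spec_get_solid_paper (paper : List (List Int)) (out : Int × Int) : Prop := out = get_solid_paper_alt paper
instance (paper : List (List Int)) (out : Int × Int) : Decidable (Spec_get_solid_paper paper out) := by unfold Spec_get_solid_paper; infer_instance

-- ===== CLAIM (what is proved, stated in full; the proofs are below) =====
def Claim_equal_get_solid_paper : Prop := ∀ (paper : List (List Int)), Dom_get_solid_paper paper → Spec_get_solid_paper paper (get_solid_paper paper)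

-- ===== LEMMAS AND PROOFS =====

theorem mem_foldl_update (rs : List (List Int)) (s : PySem.Set Int) (x : Int) :
    x ∈ rs.foldl (fun s row => PySem.Set.update s row) s ↔ x ∈ s ∨ x ∈ rs.flatten := by
  induction rs generalizing s with
  | nil => simp
  | cons r rs ih =>
      simp [List.foldl_cons, ih, PySem.Set.mem_update]
      tauto

theorem count_pos_iff (row : List Int) (v : Int) :
    0 < (PySem.List.count row v : Int) ↔ v ∈ row := by
  simp [PySem.List.count_eq, List.count_pos_iff]

theorem loop_spec (rs : List (List Int)) (bc wc : Int) (hb : 0 ≤ bc) (hw : 0 ≤ wc)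
    (hne : ¬(0 < bc ∧ 0 < wc)) :
    get_solid_paper_loop rs bc wc =
      if (0 < bc ∨ (1:Int) ∈ rs.flatten) ∧ (0 < wc ∨ (0:Int) ∈ rs.flatten) then (0, 0)
      else if 0 < wc ∨ (0:Int) ∈ rs.flatten then (1, 0) else (0, 1) := by
  induction rs generalizing bc wc with
  | nil =>
      simp only [get_solid_paper_loop, List.flatten_nil, List.not_mem_nil, or_false]
      rw [if_neg hne]
  | cons row rest ih =>
      have hc1 := count_pos_iff row 1
      have hc0 := count_pos_iff row 0
      have hcb : (0:Int) ≤ (PySem.List.count row 1 : Int) := Int.natCast_nonneg _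
      have hcw : (0:Int) ≤ (PySem.List.count row 0 : Int) := Int.natCast_nonneg _
      have hm1 : (1:Int) ∈ (row :: rest).flatten ↔ (1:Int) ∈ row ∨ (1:Int) ∈ rest.flatten := by
        simp [List.flatten_cons]
      have hm0 : (0:Int) ∈ (row :: rest).flatten ↔ (0:Int) ∈ row ∨ (0:Int) ∈ rest.flatten := by
        simp [List.flatten_cons]
      simp only [get_solid_paper_loop]
      by_cases hboth : 0 < bc + (PySem.List.count row 1 : Int) ∧ 0 < wc + (PySem.List.count row 0 : Int)
      · have hprod : (bc + (PySem.List.count row 1 : Int)) * (wc + (PySem.List.count row 0 : Int)) ≠ 0 :=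
          ne_of_gt (mul_pos hboth.1 hboth.2)
        rw [if_pos hprod]
        have h1 : 0 < bc ∨ (1:Int) ∈ (row :: rest).flatten := by
          by_cases hbc : 0 < bc
          · exact Or.inl hbc
          · exact Or.inr (hm1.2 (Or.inl (hc1.1 (by omega))))
        have h0 : 0 < wc ∨ (0:Int) ∈ (row :: rest).flatten := by
          by_cases hwc : 0 < wc
          · exact Or.inl hwc
          · exact Or.inr (hm0.2 (Or.inl (hc0.1 (by omega))))
        rw [if_pos ⟨h1, h0⟩]
      · have hzero : bc + (PySem.List.count row 1 : Int) = 0 ∨ wc + (PySem.List.count row 0 : Int) = 0 := by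
          omega
        have hprod : (bc + (PySem.List.count row 1 : Int)) * (wc + (PySem.List.count row 0 : Int)) = 0 :=
          mul_eq_zero.2 hzero
        rw [if_neg (not_not_intro hprod), ih _ _ (by omega) (by omega) hboth]
        have e1 : (0 < bc + (PySem.List.count row 1 : Int) ∨ (1:Int) ∈ rest.flatten)
            ↔ (0 < bc ∨ (1:Int) ∈ (row :: rest).flatten) := by
          rw [hm1]
          constructor
          · rintro (h | h)
            · by_cases hbc : 0 < bc
              · exact Or.inl hbc
              · exact Or.inr (Or.inl (hc1.1 (by omega)))
            · exact Or.inr (Or.inr h)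
          · rintro (h | h | h)
            · left; omega
            · left; have := hc1.2 h; omega
            · exact Or.inr h
        have e0 : (0 < wc + (PySem.List.count row 0 : Int) ∨ (0:Int) ∈ rest.flatten)
            ↔ (0 < wc ∨ (0:Int) ∈ (row :: rest).flatten) := by
          rw [hm0]
          constructor
          · rintro (h | h)
            · by_cases hwc : 0 < wc
              · exact Or.inl hwc
              · exact Or.inr (Or.inl (hc0.1 (by omega)))
            · exact Or.inr (Or.inr h)
          · rintro (h | h | h)
            · left; omega
            · left; have := hc0.2 h; omega
            · exact Or.inr h
        rw [if_congr (and_congr e1 e0) rfl rfl, if_congr e0 rfl rfl]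

-- ===== VERDICT (by name: the statement is the Claim_ definition above) =====
theorem get_solid_paper_spec : Claim_equal_get_solid_paper := by
  intro paper _
  unfold Spec_get_solid_paper get_solid_paper get_solid_paper_alt
  have hA := loop_spec paper 0 0 le_rfl le_rfl (by omega)
  rw [hA]
  have hm : ∀ x : Int, PySem.Set.contains
      (paper.foldl (fun s row => PySem.Set.update s row) PySem.Set.empty) x
      = decide (x ∈ paper.flatten) := by
    intro x
    simp [mem_foldl_update, PySem.Set.empty]
  simp only [hm]
  by_cases h0 : (0:Int) ∈ paper.flatten <;> by_cases h1 : (1:Int) ∈ paper.flatten <;>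
    simp [h0, h1]
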